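-- pv_equiv track=rewrite | github.com/NSebastianCampos/PPP_1.Python | biblioteca.py | es_cadena_de_digitos
-- ===== SOURCE A (Python) =====
-- def es_cadena_de_digitos(cadena):
--     '''
--     Verifica si todos los caracteres de un string son dígitos numéricos.
--     Es el reemplazo algorítmico del método .isdigit().
--     - Recibe: un string 'cadena'.
--     - Devuelve: True si todos son dígitos, False en caso contrario.
--     '''
--     # Se define una lista con los caracteres que consideramos dígitos.
--     digitos_validos = ['0', '1', '2', '3', '4', '5', '6', '7', '8', '9']
--     # Se inicializa la bandera asumiendo que la cadena es válida.
--     es_valida = True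
--     # Se recorre la cadena caracter por caracter con un bucle while.
--     i = 0
--     while i < len(cadena):
--         caracter_actual = cadena[i]
--         # Se prepara una bandera para verificar el caracter actual.
--         es_un_digito = False
--         j = 0
--         # Se recorre la lista de dígitos válidos para comparar.
--         while j < len(digitos_validos):
--             if caracter_actual == digitos_validos[j]:
--                 es_un_digito = True
--                 break # Si encontramos que es un dígito, no hace falta seguir comparando.
--             j = j + 1
--
--         # Si, después de comparar con todos los dígitos válidos, la bandera
--         # 'es_un_digito' sigue en False, significa que el caracter no es un número.
--         if es_un_digito == False:
--             es_valida = False # La cadena completa no es válida.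
--             break # Se detiene el bucle principal.
--         i = i + 1
--     return es_valida
-- ===== SOURCE B (Python) =====
-- def es_cadena_de_digitos(cadena):
--     return set(cadena) <= {'0', '1', '2', '3', '4', '5', '6', '7', '8', '9'}
-- ===== Notes on version B (the rewrite author's own statement) =====
-- stated objective: idiomatic
-- what changed: Replaces the flag-and-break nested while loops with a one-pass set construction and a whole-set subset test against the digit set.
import Mathlib
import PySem

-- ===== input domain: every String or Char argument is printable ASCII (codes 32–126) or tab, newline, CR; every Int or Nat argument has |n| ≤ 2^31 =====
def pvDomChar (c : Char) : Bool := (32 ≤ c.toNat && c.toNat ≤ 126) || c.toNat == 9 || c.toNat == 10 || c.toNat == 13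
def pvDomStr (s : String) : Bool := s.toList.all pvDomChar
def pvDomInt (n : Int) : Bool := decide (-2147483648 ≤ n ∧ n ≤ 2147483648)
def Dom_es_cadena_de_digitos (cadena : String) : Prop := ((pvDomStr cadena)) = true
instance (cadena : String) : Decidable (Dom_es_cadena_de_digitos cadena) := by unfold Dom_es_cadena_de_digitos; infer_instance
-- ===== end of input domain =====

-- B replaces A's nested flag-and-break loops with a set construction plus a subset test (idiomatic, same cost).

-- ===== PORT A =====
-- inner while loop: scan digitos_validos for caracter_actual, break (true) on match
def esUnDigitoLoop (caracter_actual : Char) : List Char → Bool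
  | [] => false
  | d :: rest => if caracter_actual == d then true else esUnDigitoLoop caracter_actual rest

-- outer while loop: es_valida flag, break (false) on first non-digit character
def esValidaLoop : List Char → Bool
  | [] => true
  | c :: rest =>
    if (esUnDigitoLoop c ['0','1','2','3','4','5','6','7','8','9']) = false then false
    else esValidaLoop rest

def es_cadena_de_digitos (cadena : String) : Bool := esValidaLoop cadena.toList

-- ===== PORT B =====
def es_cadena_de_digitos_alt (cadena : String) : Bool :=
  PySem.Set.issubset (PySem.Set.ofList cadena.toList)
    (PySem.Set.ofList ['0','1','2','3','4','5','6','7','8','9'])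

-- ===== PRECONDITION & SPEC =====
def Spec_es_cadena_de_digitos (cadena : String) (out : Bool) : Prop := out = es_cadena_de_digitos_alt cadena
instance (cadena : String) (out : Bool) : Decidable (Spec_es_cadena_de_digitos cadena out) := by unfold Spec_es_cadena_de_digitos; infer_instance

-- ===== CLAIM (what is proved, stated in full; the proofs are below) =====
def Claim_equal_es_cadena_de_digitos : Prop := ∀ (cadena : String), Dom_es_cadena_de_digitos cadena → Spec_es_cadena_de_digitos cadena (es_cadena_de_digitos cadena)

-- ===== LEMMAS AND PROOFS =====
theorem esUnDigitoLoop_eq_mem (c : Char) (ds : List Char) :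
    esUnDigitoLoop c ds = decide (c ∈ ds) := by
  induction ds with
  | nil => simp [esUnDigitoLoop]
  | cons d rest ih =>
    simp only [esUnDigitoLoop, List.mem_cons]
    by_cases h : c = d
    · simp [h]
    · simp [h, ih, beq_iff_eq]

theorem esValidaLoop_eq_all (l : List Char) :
    esValidaLoop l = l.all (fun c => decide (c ∈ (['0','1','2','3','4','5','6','7','8','9'] : List Char))) := by
  induction l with
  | nil => rfl
  | cons c rest ih =>
    simp only [esValidaLoop, esUnDigitoLoop_eq_mem, List.all_cons, ih]
    by_cases h : c ∈ (['0','1','2','3','4','5','6','7','8','9'] : List Char) <;> simp [h]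

theorem alt_eq_all (l : List Char) :
    PySem.Set.issubset (PySem.Set.ofList l) (PySem.Set.ofList ['0','1','2','3','4','5','6','7','8','9'])
      = l.all (fun c => decide (c ∈ (['0','1','2','3','4','5','6','7','8','9'] : List Char))) := by
  rcases hb : PySem.Set.issubset (PySem.Set.ofList l) (PySem.Set.ofList ['0','1','2','3','4','5','6','7','8','9']) with _ | _
  · symm
    rw [Bool.eq_false_iff] at hb ⊢
    intro hall
    apply hb
    rw [PySem.Set.issubset_iff]
    intro x hx
    rw [PySem.Set.mem_ofList] at hx ⊢
    rw [List.all_eq_true] at hall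
    simpa using hall x hx
  · symm
    rw [PySem.Set.issubset_iff] at hb
    rw [List.all_eq_true]
    intro x hx
    have := hb x (by rw [PySem.Set.mem_ofList]; exact hx)
    rw [PySem.Set.mem_ofList] at this
    simpa using this

-- ===== VERDICT (by name: the statement is the Claim_ definition above) =====
theorem es_cadena_de_digitos_spec : Claim_equal_es_cadena_de_digitos := by
  intro cadena _
  unfold Spec_es_cadena_de_digitos es_cadena_de_digitos es_cadena_de_digitos_alt
  rw [esValidaLoop_eq_all, alt_eq_all]
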